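-- pv_equiv track=rewrite | github.com/andrewccchan/ADLxMLDS2017 | hw1/test2.py | output_smoothing
-- ===== SOURCE A (Python) =====
-- def output_smoothing(phone_wise, length):
--     edited_phone = []
--     tmp = []
--     for _, p in enumerate(phone_wise):
--         if len(tmp) > 0 and p[1] != tmp[-1][1]:
--             if len(tmp) > length:
--                 edited_phone.extend(tmp)
--             tmp = []
--         tmp.append(p)
--     if len(tmp) > length:
--         edited_phone.extend(tmp)
--     return edited_phone
-- ===== SOURCE B (Python) =====
-- def output_smoothing(phone_wise, length):
--     res = []
--     n = len(phone_wise)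
--     i = 0
--     while i < n:
--         key = phone_wise[i][1]
--         j = i + 1
--         while j < n and phone_wise[j][1] == key:
--             j += 1
--         if j - i > length:
--             res.extend(phone_wise[i:j])
--         i = j
--     return res
-- ===== Notes on version B (the rewrite author's own statement) =====
-- stated objective: alternative
-- what changed: Replaces the element-by-element fold with a tmp accumulator and change detection by a two-pointer scan that finds each maximal run of equal phones by index and emits the whole run via one slice when it exceeds the threshold.
import Mathlib
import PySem

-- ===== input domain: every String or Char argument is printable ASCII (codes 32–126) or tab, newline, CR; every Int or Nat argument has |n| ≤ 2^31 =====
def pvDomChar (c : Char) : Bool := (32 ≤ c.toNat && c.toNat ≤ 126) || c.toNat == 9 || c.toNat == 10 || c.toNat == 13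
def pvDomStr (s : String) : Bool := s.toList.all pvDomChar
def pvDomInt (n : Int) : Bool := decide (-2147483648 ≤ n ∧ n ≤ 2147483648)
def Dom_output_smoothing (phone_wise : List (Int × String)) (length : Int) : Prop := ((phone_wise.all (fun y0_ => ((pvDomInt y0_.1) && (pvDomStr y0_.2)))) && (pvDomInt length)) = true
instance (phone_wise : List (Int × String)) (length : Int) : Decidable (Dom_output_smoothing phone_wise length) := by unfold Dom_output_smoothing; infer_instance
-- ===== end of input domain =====

-- B replaces A's element-by-element fold (tmp accumulator + change detection) with a
-- two-pointer scan that locates each maximal run by index and emits it with one slice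
-- when it is longer than the threshold (objective: alternative, same cost).

-- ===== PORT A =====
-- 'len(tmp) > 0 and p[1] != tmp[-1][1]' (tmp[-1] on a nonempty list is its last element)
def condA (t : List (Int × String)) (p : Int × String) : Bool :=
  decide (0 < t.length) &&
    (match t.getLast? with
     | some q => p.2 != q.2
     | none => false)

-- one iteration of A's for-loop: possibly flush tmp into edited_phone, then append p to tmp
def stepA (len : Int) (st : List (Int × String) × List (Int × String)) (p : Int × String) :
    List (Int × String) × List (Int × String) :=
  let et := if condA st.2 p then
              (if (st.2.length : Int) > len then st.1 ++ st.2 else st.1, ([] : List (Int × String)))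
            else (st.1, st.2)
  (et.1, et.2 ++ [p])

def output_smoothing (phone_wise : List (Int × String)) (length : Int) : List (Int × String) :=
  let st := phone_wise.foldl (stepA length) ([], [])
  if (st.2.length : Int) > length then st.1 ++ st.2 else st.1

-- ===== PORT B =====
-- inner while: 'while j < n and phone_wise[j][1] == key: j += 1'
def runLen (xs : List (Int × String)) (key : String) (j : Nat) : Nat :=
  if h : j < xs.length then
    if (xs[j]'h).2 == key then runLen xs key (j + 1) else j
  else j
termination_by xs.length - j

-- needed by bLoop's termination proof
theorem runLen_ge (xs : List (Int × String)) (key : String) (j : Nat) : j ≤ runLen xs key j := by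
  fun_induction runLen with
  | case1 => omega
  | case2 => simp_all
  | case3 => simp_all

-- outer while over i: find the run [i, j), emit phone_wise[i:j] if long enough, continue at j
def bLoop (xs : List (Int × String)) (len : Int) (i : Nat) : List (Int × String) :=
  if h : i < xs.length then
    let j := runLen xs (xs[i]'h).2 (i + 1)
    (if (j : Int) - (i : Int) > len then PySem.List.slice xs (some (i : Int)) (some (j : Int)) else [])
      ++ bLoop xs len j
  else []
termination_by xs.length - i
decreasing_by
  have := runLen_ge xs (xs[i]'h).2 (i + 1); omega

def output_smoothing_alt (phone_wise : List (Int × String)) (length : Int) : List (Int × String) :=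
  bLoop phone_wise length 0

-- ===== PRECONDITION & SPEC =====
def Spec_output_smoothing (phone_wise : List (Int × String)) (length : Int) (out : List (Int × String)) : Prop := out = output_smoothing_alt phone_wise length
instance (phone_wise : List (Int × String)) (length : Int) (out : List (Int × String)) : Decidable (Spec_output_smoothing phone_wise length out) := by unfold Spec_output_smoothing; infer_instance

-- ===== CLAIM (what is proved, stated in full; the proofs are below) =====
def Claim_equal_output_smoothing : Prop := ∀ (phone_wise : List (Int × String)) (length : Int), Dom_output_smoothing phone_wise length → Spec_output_smoothing phone_wise length (output_smoothing phone_wise length)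

-- ===== LEMMAS AND PROOFS =====

-- length of the initial run of ys whose phone equals key
def countRun (key : String) : List (Int × String) → Nat
  | [] => 0
  | q :: qs => if q.2 = key then countRun key qs + 1 else 0

-- A's result on ys starting from the fresh state
def Afun (len : Int) (ys : List (Int × String)) : List (Int × String) :=
  let st := ys.foldl (stepA len) ([], [])
  if (st.2.length : Int) > len then st.1 ++ st.2 else st.1

theorem stepA_e (len : Int) (e t : List (Int × String)) (p : Int × String) :
    stepA len (e, t) p = (e ++ (stepA len ([], t) p).1, (stepA len ([], t) p).2) := by
  simp only [stepA]
  split_ifs <;> simp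

theorem foldA_e (len : Int) (xs : List (Int × String)) :
    ∀ (e t : List (Int × String)),
      xs.foldl (stepA len) (e, t) =
        (e ++ (xs.foldl (stepA len) ([], t)).1, (xs.foldl (stepA len) ([], t)).2) := by
  induction xs with
  | nil => intro e t; simp
  | cons p xs ih =>
    intro e t
    simp only [List.foldl_cons]
    rw [stepA_e]
    rw [ih, ih ((stepA len ([], t) p).1)]
    simp [List.append_assoc]

-- the run-step characterisation of A's fold
theorem fold_run (len : Int) (key : String) (xs : List (Int × String)) :
    ∀ (e t : List (Int × String)), t ≠ [] → (∀ q ∈ t, q.2 = key) →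
      (let st := xs.foldl (stepA len) (e, t);
       if (st.2.length : Int) > len then st.1 ++ st.2 else st.1)
      = (if ((t.length + countRun key xs : Nat) : Int) > len
           then e ++ t ++ xs.takeWhile (fun q => q.2 == key) else e)
        ++ Afun len (xs.dropWhile (fun q => q.2 == key)) := by
  induction xs with
  | nil =>
    intro e t ht hk
    simp only [List.foldl_nil, countRun, List.takeWhile_nil, List.dropWhile_nil, Afun,
      List.foldl_nil, List.length_nil]
    norm_num
  | cons p xs ih =>
    intro e t ht hk
    have hlast : t.getLast? = some (t.getLast ht) := List.getLast?_eq_some_getLast ht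
    have hkey : (t.getLast ht).2 = key := hk _ (List.getLast_mem ht)
    by_cases hp : p.2 = key
    · -- same phone: no flush, tmp grows
      have hcond : condA t p = false := by
        simp [condA, hlast, hp, hkey]
      have hstep : stepA len (e, t) p = (e, t ++ [p]) := by
        simp [stepA, hcond]
      simp only [List.foldl_cons, hstep]
      rw [ih e (t ++ [p]) (by simp) (by intro q hq; rcases List.mem_append.1 hq with h | h
                                        · exact hk q h
                                        · simp at h; simp [h, hp])]
      simp only [countRun, List.takeWhile_cons, List.dropWhile_cons, hp,
        List.length_append, List.length_singleton]
      have harith : (t.length + 1 + countRun key xs : Nat) = (t.length + (countRun key xs + 1) : Nat) := by omega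
      rw [harith]
      simp [List.append_assoc]
    · -- phone changes: flush tmp, restart with [p]
      have hcond : condA t p = true := by
        simp [condA, hlast, hkey]
        exact ⟨List.length_pos_of_ne_nil ht, hp⟩
      have hstep : stepA len (e, t) p =
          ((if (t.length : Int) > len then e ++ t else e), [p]) := by
        simp [stepA, hcond]
      simp only [List.foldl_cons, hstep]
      rw [foldA_e]
      have hA : Afun len (p :: xs) =
          (let st := xs.foldl (stepA len) ([], [p]);
           if (st.2.length : Int) > len then st.1 ++ st.2 else st.1) := by
        have h0 : stepA len ([], []) p = ([], [p]) := by simp [stepA, condA]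
        simp [Afun, h0]
      simp only [countRun, hp, List.takeWhile_cons, List.dropWhile_cons]
      simp only [if_false]
      simp only [Nat.add_zero]
      rw [show (xs.foldl (stepA len) ([], [p])) = ((xs.foldl (stepA len) ([], [p])).1, (xs.foldl (stepA len) ([], [p])).2) from rfl] at hA
      split_ifs with h1 h2 <;> simp_all

theorem Afun_cons (len : Int) (p : Int × String) (ps : List (Int × String)) :
    Afun len (p :: ps) =
      (if ((1 + countRun p.2 ps : Nat) : Int) > len
         then p :: ps.takeWhile (fun q => q.2 == p.2) else [])
        ++ Afun len (ps.dropWhile (fun q => q.2 == p.2)) := by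
  have h0 : stepA len ([], []) p = ([], [p]) := by simp [stepA, condA]
  have := fold_run len p.2 ps [] [p] (by simp) (by simp)
  simp only [List.length_singleton] at this
  simpa [Afun, h0] using this

theorem runLen_eq (xs : List (Int × String)) (key : String) (j : Nat) :
    runLen xs key j = j + countRun key (xs.drop j) := by
  fun_induction runLen with
  | case1 j h heq ih =>
    rw [List.drop_eq_getElem_cons h]
    simp at heq
    simp [countRun, heq, ih]
    omega
  | case2 j h heq =>
    rw [List.drop_eq_getElem_cons h]
    simp at heq
    simp [heq, countRun]
  | case3 j h =>
    rw [List.drop_of_length_le (by omega)]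
    simp [countRun]

theorem take_countRun (key : String) (ys : List (Int × String)) :
    ys.take (countRun key ys) = ys.takeWhile (fun q => q.2 == key) := by
  induction ys with
  | nil => simp [countRun]
  | cons q qs ih =>
    by_cases h : q.2 = key
    · simp [countRun, h, ih]
    · simp [countRun, h]

theorem drop_countRun (key : String) (ys : List (Int × String)) :
    ys.drop (countRun key ys) = ys.dropWhile (fun q => q.2 == key) := by
  induction ys with
  | nil => simp [countRun]
  | cons q qs ih =>
    by_cases h : q.2 = key
    · simp [countRun, h, ih]
    · simp [countRun, h]

theorem bLoop_eq (xs : List (Int × String)) (len : Int) (i : Nat) :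
    bLoop xs len i = Afun len (xs.drop i) := by
  fun_induction bLoop with
  | case1 i h j ih =>
    have hdrop : xs.drop i = (xs[i]'h) :: xs.drop (i + 1) := List.drop_eq_getElem_cons h
    have hj : j = (i + 1) + countRun (xs[i]'h).2 (xs.drop (i + 1)) := runLen_eq xs (xs[i]'h).2 (i + 1)
    have hslice : PySem.List.slice xs (some (i : Int)) (some (j : Int)) =
        (xs[i]'h) :: (xs.drop (i + 1)).takeWhile (fun q => q.2 == (xs[i]'h).2) := by
      rw [PySem.List.slice_natCast,
        show j - i = countRun (xs[i]'h).2 (xs.drop (i + 1)) + 1 by omega,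
        hdrop, List.take_succ_cons, take_countRun]
    have hdropj : xs.drop j = (xs.drop (i + 1)).dropWhile (fun q => q.2 == (xs[i]'h).2) := by
      have h2 : xs.drop j = (xs.drop (i + 1)).drop (countRun (xs[i]'h).2 (xs.drop (i + 1))) := by
        rw [List.drop_drop]
        congr 1
      rw [h2, drop_countRun]
    have hcond : ((j : Int) - (i : Int)) = ((1 + countRun (xs[i]'h).2 (xs.drop (i + 1)) : Nat) : Int) := by
      push_cast; omega
    rw [ih, hdropj, hslice, hdrop, Afun_cons]
    simp only [hcond]
  | case2 i h =>
    rw [List.drop_of_length_le (by omega)]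
    simp [Afun, List.foldl_nil]

-- ===== VERDICT (by name: the statement is the Claim_ definition above) =====
theorem output_smoothing_spec : Claim_equal_output_smoothing := by
  intro phone_wise length _
  unfold Spec_output_smoothing output_smoothing output_smoothing_alt
  rw [bLoop_eq]
  simp [Afun]
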